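-- pv_equiv track=rewrite | github.com/lastis-citra/get-navitime-train-line-time | main.py | create_name_seq_one
-- ===== SOURCE A (Python) =====
-- def create_name_seq_one(old_name_seq, check_point, check_name_seq):
--     if check_point >= len(check_name_seq):
--         return old_name_seq
--     check_name = check_name_seq[check_point]
--     new_name_seq = old_name_seq
--     if check_name not in old_name_seq:
--         check_point_in_check = check_name_seq.index(check_name)
--         if check_point_in_check > 0:
--             pre_check_name = check_name_seq[check_point_in_check - 1]
--             if pre_check_name in old_name_seq:
--                 split_point = old_name_seq.index(pre_check_name)
--                 new_name_seq = old_name_seq[:split_point + 1] + [check_name] + old_name_seq[split_point + 1:]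
--             else:
--                 new_name_seq = [check_name] + old_name_seq
--         else:
--             new_name_seq = [check_name] + old_name_seq
--     return create_name_seq_one(new_name_seq, check_point + 1, check_name_seq)
-- ===== SOURCE B (Python) =====
-- def create_name_seq_one(old_name_seq, check_point, check_name_seq):
--     m = len(check_name_seq)
--     if check_point >= m:
--         return old_name_seq
--     # first-occurrence index of every name in check_name_seq (replaces repeated .index scans)
--     first = {}
--     for j, nm in enumerate(check_name_seq):
--         if nm not in first:
--             first[nm] = j
--     # linked list of node ids over the evolving sequence: O(1) insertion
--     names = list(old_name_seq)           # node id -> name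
--     nxt = {}                             # node id -> next node id (-1 = end of list)
--     for k in range(len(names)):
--         nxt[k] = k + 1 if k + 1 < len(names) else -1
--     head = 0 if names else -1
--     node = {}                            # name -> node id of its first occurrence
--     for k, nm in enumerate(names):
--         if nm not in node:
--             node[nm] = k
--     for i in range(check_point, m):
--         name = check_name_seq[i]
--         if name in node:
--             continue
--         j = first[name]
--         nid = len(names)
--         names.append(name)
--         if j > 0 and check_name_seq[j - 1] in node:
--             p = node[check_name_seq[j - 1]]
--             nxt[nid] = nxt[p]
--             nxt[p] = nid
--         else:
--             nxt[nid] = head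
--             head = nid
--         node[name] = nid
--     out = []
--     c = head
--     while c != -1:
--         out.append(names[c])
--         c = nxt[c]
--     return out
-- ===== Notes on version B (the rewrite author's own statement) =====
-- stated objective: faster
-- what changed: A rebuilds the list by membership scans, .index scans and slice concatenation at every recursion step; B precomputes a first-occurrence dict for check_name_seq and maintains the evolving sequence as a linked list of node ids with dict positions, so each insertion is O(1) and the list is materialised once at the end.
import Mathlib
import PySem

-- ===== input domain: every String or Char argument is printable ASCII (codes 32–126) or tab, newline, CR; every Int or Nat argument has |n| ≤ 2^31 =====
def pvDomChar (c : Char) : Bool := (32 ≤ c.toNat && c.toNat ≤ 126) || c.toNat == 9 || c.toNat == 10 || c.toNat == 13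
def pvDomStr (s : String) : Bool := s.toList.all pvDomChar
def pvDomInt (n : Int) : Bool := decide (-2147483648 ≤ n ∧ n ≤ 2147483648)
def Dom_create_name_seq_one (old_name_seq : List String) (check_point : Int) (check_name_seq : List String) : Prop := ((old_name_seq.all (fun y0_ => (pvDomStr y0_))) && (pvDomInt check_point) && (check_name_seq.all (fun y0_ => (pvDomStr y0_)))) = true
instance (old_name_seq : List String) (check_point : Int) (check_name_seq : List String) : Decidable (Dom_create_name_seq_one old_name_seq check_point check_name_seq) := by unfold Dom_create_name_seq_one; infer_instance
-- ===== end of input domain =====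

-- B replaces A's tail recursion with repeated list slicing/scans by one pass over a
-- linked-list-of-node-ids representation with dict positions (objective: faster).

-- ===== PORT A =====
def create_name_seq_one (old_name_seq : List String) (check_point : Int) (check_name_seq : List String) : List String :=
  if _h : (check_name_seq.length : Int) ≤ check_point then old_name_seq
  else
    -- check_name_seq[check_point]: raises IndexError when check_point < -len (excluded by Pre_)
    let check_name := PySem.List.pyGetD check_name_seq check_point ""
    let new_name_seq :=
      if check_name ∉ old_name_seq then
        match PySem.List.index? check_name_seq check_name with
        | none => old_name_seq   -- unreachable: check_name was read out of check_name_seq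
        | some check_point_in_check =>
          if 0 < check_point_in_check then
            let pre_check_name := PySem.List.pyGetD check_name_seq ((check_point_in_check : Int) - 1) ""
            if pre_check_name ∈ old_name_seq then
              match PySem.List.index? old_name_seq pre_check_name with
              | none => old_name_seq   -- unreachable: membership just checked
              | some split_point =>
                PySem.List.slice old_name_seq none (some ((split_point : Int) + 1)) ++ [check_name] ++
                  PySem.List.slice old_name_seq (some ((split_point : Int) + 1)) none
            else check_name :: old_name_seq
          else check_name :: old_name_seq
      else old_name_seq
    create_name_seq_one new_name_seq (check_point + 1) check_name_seq
termination_by ((check_name_seq.length : Int) - check_point).toNat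
decreasing_by omega

-- ===== PORT B =====
structure BState where
  names : List String             -- node id -> name
  nxt : PySem.Dict Int Int        -- node id -> next node id (-1 = end of list)
  node : PySem.Dict String Int    -- name -> node id of its first occurrence
  head : Int

-- first-occurrence index of every name in check_name_seq
def altFirst (check_name_seq : List String) : PySem.Dict String Int :=
  (PySem.List.enumerate check_name_seq).foldl
    (fun d p => if d.contains p.2 then d else d.insert p.2 p.1) PySem.Dict.empty

def altInit (old_name_seq : List String) : BState :=
  { names := old_name_seq
  , nxt := (PySem.List.pyRange 0 (old_name_seq.length : Int)).foldl
      (fun d k => d.insert k (if k + 1 < (old_name_seq.length : Int) then k + 1 else -1))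
      PySem.Dict.empty
  , head := if old_name_seq = [] then -1 else 0
  , node := (PySem.List.enumerate old_name_seq).foldl
      (fun d p => if d.contains p.2 then d else d.insert p.2 p.1) PySem.Dict.empty }

def altStep (check_name_seq : List String) (first : PySem.Dict String Int)
    (st : BState) (i : Int) : BState :=
  -- check_name_seq[i]: i is in range under Pre_
  let name := PySem.List.pyGetD check_name_seq i ""
  if st.node.contains name then st
  else
    let j := first.getD name 0
    let nid : Int := (st.names.length : Int)
    let names' := st.names ++ [name]
    if 0 < j ∧ st.node.contains (PySem.List.pyGetD check_name_seq (j - 1) "") then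
      let p := st.node.getD (PySem.List.pyGetD check_name_seq (j - 1) "") 0
      { names := names'
      , nxt := (st.nxt.insert nid (st.nxt.getD p (-1))).insert p nid
      , node := st.node.insert name nid
      , head := st.head }
    else
      { names := names'
      , nxt := st.nxt.insert nid st.head
      , node := st.node.insert name nid
      , head := nid }

-- the final while loop; fuel = number of nodes bounds the walk (the chain is acyclic
-- and visits each node at most once, so the fuel is never what stops it)
def altWalk (names : List String) (nxt : PySem.Dict Int Int) : Nat → Int → List String
  | 0, _ => []
  | fuel + 1, c =>
    if c = -1 then []
    else PySem.List.pyGetD names c "" :: altWalk names nxt fuel (nxt.getD c (-1))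

def create_name_seq_one_alt (old_name_seq : List String) (check_point : Int) (check_name_seq : List String) : List String :=
  if (check_name_seq.length : Int) ≤ check_point then old_name_seq
  else
    let first := altFirst check_name_seq
    let stF := (PySem.List.pyRange check_point (check_name_seq.length : Int)).foldl
      (altStep check_name_seq first) (altInit old_name_seq)
    altWalk stF.names stF.nxt stF.names.length stF.head

-- ===== PRECONDITION & SPEC =====
-- Pre_ excludes exactly check_point < -len(check_name_seq), where A (and B) raise
-- IndexError on check_name_seq[check_point].
def Pre_create_name_seq_one (old_name_seq : List String) (check_point : Int) (check_name_seq : List String) : Prop :=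
  -(check_name_seq.length : Int) ≤ check_point
instance (old_name_seq : List String) (check_point : Int) (check_name_seq : List String) : Decidable (Pre_create_name_seq_one old_name_seq check_point check_name_seq) := by unfold Pre_create_name_seq_one; infer_instance

def pvWitness_create_name_seq_one : List String × Int × List String :=
  (["b", "d"], 0, ["a", "b", "c", "d"])

def Spec_create_name_seq_one (old_name_seq : List String) (check_point : Int) (check_name_seq : List String) (out : List String) : Prop := out = create_name_seq_one_alt old_name_seq check_point check_name_seq
instance (old_name_seq : List String) (check_point : Int) (check_name_seq : List String) (out : List String) : Decidable (Spec_create_name_seq_one old_name_seq check_point check_name_seq out) := by unfold Spec_create_name_seq_one; infer_instance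

-- ===== CLAIM (what is proved, stated in full; the proofs are below) =====
def Claim_equal_create_name_seq_one : Prop := ∀ (old_name_seq : List String) (check_point : Int) (check_name_seq : List String), Dom_create_name_seq_one old_name_seq check_point check_name_seq → Pre_create_name_seq_one old_name_seq check_point check_name_seq → Spec_create_name_seq_one old_name_seq check_point check_name_seq (create_name_seq_one old_name_seq check_point check_name_seq)

-- ===== LEMMAS AND PROOFS =====

-- A's one recursion step, as a function (exactly the body of the A port)
def stepA (check_name_seq : List String) (s : List String) (i : Int) : List String :=
  let check_name := PySem.List.pyGetD check_name_seq i ""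
  if check_name ∉ s then
    match PySem.List.index? check_name_seq check_name with
    | none => s
    | some j =>
      if 0 < j then
        let pre := PySem.List.pyGetD check_name_seq ((j : Int) - 1) ""
        if pre ∈ s then
          match PySem.List.index? s pre with
          | none => s
          | some sp =>
            PySem.List.slice s none (some ((sp : Int) + 1)) ++ [check_name] ++
              PySem.List.slice s (some ((sp : Int) + 1)) none
        else check_name :: s
      else check_name :: s
  else s

-- the name stored at node id c
def NameAt (names : List String) (c : Int) : String := PySem.List.pyGetD names c ""

-- "starting at c and following nxt we traverse exactly the node ids `ids`, ending at -1"
def Chain (nxt : PySem.Dict Int Int) : Int → List Int → Prop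
  | c, [] => c = -1
  | c, x :: rest => c = x ∧ ∃ n, nxt.get? x = some n ∧ Chain nxt n rest

-- simulation invariant between B's state and A's plain list
def SimInv (st : BState) (s : List String) : Prop :=
  ∃ ids : List Int,
    Chain st.nxt st.head ids ∧
    s = ids.map (NameAt st.names) ∧
    (∀ c ∈ ids, 0 ≤ c ∧ c < (st.names.length : Int)) ∧
    ids.Nodup ∧
    ids.length ≤ st.names.length ∧
    (∀ nm : String, st.node.get? nm = ids.find? (fun c => NameAt st.names c == nm))

theorem find?_congr_mem {α : Type} (l : List α) (p q : α → Bool)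
    (h : ∀ x ∈ l, p x = q x) : l.find? p = l.find? q := by
  induction l with
  | nil => rfl
  | cons a t ih =>
    simp only [List.find?_cons]
    rw [h a (by simp)]
    cases q a with
    | true => rfl
    | false => exact ih (fun x hx => h x (by simp [hx]))

theorem A_eq_fold : ∀ (n : Nat) (old : List String) (cp : Int) (seq : List String),
    ((seq.length : Int) - cp).toNat = n →
    create_name_seq_one old cp seq = (PySem.List.pyRange cp (seq.length : Int)).foldl (stepA seq) old := by
  intro n
  induction n with
  | zero =>
    intro old cp seq h
    have hle : (seq.length : Int) ≤ cp := by omega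
    rw [create_name_seq_one, dif_pos hle, PySem.List.pyRange_one]
    have : ((seq.length : Int) - cp).toNat = 0 := by omega
    rw [this]
    rfl
  | succ k ih =>
    intro old cp seq h
    have hlt : cp < (seq.length : Int) := by omega
    rw [create_name_seq_one, dif_neg (by omega), PySem.List.pyRange_one_cons hlt, List.foldl_cons]
    exact ih _ (cp + 1) seq (by omega)

theorem get?_foldl_insert_fn (l : List Int) (d : PySem.Dict Int Int) (g : Int → Int) (k : Int) :
    ((l.foldl (fun d x => d.insert x (g x)) d).get? k) = if k ∈ l then some (g k) else d.get? k := by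
  induction l generalizing d with
  | nil => simp
  | cons a t ih =>
    simp only [List.foldl_cons, ih, List.mem_cons]
    by_cases hk : k ∈ t
    · simp [hk]
    · by_cases hka : k = a
      · simp [hka, PySem.Dict.get?_insert_self]
      · simp [hk, hka, PySem.Dict.get?_insert_of_ne _ _ hka]

theorem firstAux {α : Type} (l : List (Int × α)) [DecidableEq α] (d : PySem.Dict α Int) (nm : α) :
    ((l.foldl (fun d p => if d.contains p.2 then d else d.insert p.2 p.1) d).get? nm)
      = ((d.get? nm).or ((l.find? (fun p => p.2 == nm)).map (·.1))) := by
  induction l generalizing d with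
  | nil => simp
  | cons a t ih =>
    simp only [List.foldl_cons, List.find?_cons]
    by_cases hc : d.contains a.2
    · rw [if_pos hc, ih]
      by_cases he : a.2 = nm
      · have : d.get? nm ≠ none := by
          rw [← he]
          intro h
          rw [PySem.Dict.get?_eq_none_iff_contains] at h
          simp [hc] at h
        cases hg : d.get? nm with
        | none => exact absurd hg this
        | some v => simp
      · have hbe : (a.2 == nm) = false := by simpa using he
        simp [hbe]
    · rw [if_neg hc, ih]
      by_cases he : a.2 = nm
      · have hdn : d.get? nm = none := by
          rw [PySem.Dict.get?_eq_none_iff_contains, ← he]; simpa using hc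
        subst he
        simp [hdn, PySem.Dict.get?_insert_self]
      · rw [PySem.Dict.get?_insert_of_ne _ _ (fun h => he h.symm)]
        have hbe : (a.2 == nm) = false := by simpa using he
        simp [hbe]

theorem enumerate_find? (names : List String) (s : Int) (nm : String) :
    (PySem.List.enumerate names s).find? (fun p => p.2 == nm)
      = (PySem.List.index? names nm).map (fun k : Nat => (s + (k : Int), nm)) := by
  induction names generalizing s with
  | nil => simp [PySem.List.enumerate, PySem.List.index?_eq_idxOf?]
  | cons x t ih =>
    rw [PySem.List.enumerate_cons]
    by_cases hx : x = nm
    · subst hx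
      rw [PySem.List.index?_cons_self]
      simp
    · rw [PySem.List.index?_cons_of_ne _ hx]
      simp only [List.find?_cons]
      have hbe : ((x == nm) : Bool) = false := by simpa using hx
      simp only [hbe]
      rw [ih (s + 1)]
      cases PySem.List.index? t nm with
      | none => simp
      | some k =>
        simp only [Option.map_some, Option.some.injEq, Prod.mk.injEq]
        refine ⟨by push_cast; ring, trivial⟩

theorem altFirst_getD (seq : List String) (nm : String) (j : Nat)
    (hj : PySem.List.index? seq nm = some j) :
    (altFirst seq).getD nm 0 = (j : Int) := by
  rw [PySem.Dict.getD_eq_get?_getD]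
  unfold altFirst
  rw [firstAux, enumerate_find? seq 0 nm, hj]
  simp

theorem chain_insert_of_notmem (nxt : PySem.Dict Int Int) (x v : Int) (c : Int) (ids : List Int)
    (hx : x ∉ ids) (h : Chain nxt c ids) : Chain (nxt.insert x v) c ids := by
  induction ids generalizing c with
  | nil => exact h
  | cons a t ih =>
    obtain ⟨rfl, n, hn, hc⟩ := h
    refine ⟨rfl, n, ?_, ih n (fun ht => hx (by simp [ht])) hc⟩
    rw [PySem.Dict.get?_insert_of_ne _ _ (fun he => hx (by simp [he]))]
    exact hn

theorem chain_splice (nxt : PySem.Dict Int Int) (c p nid : Int) (l1 l2 : List Int)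
    (h : Chain nxt c (l1 ++ p :: l2)) (hnd : (l1 ++ p :: l2).Nodup)
    (hfresh : nid ∉ l1 ++ p :: l2) :
    Chain ((nxt.insert nid (nxt.getD p (-1))).insert p nid) c (l1 ++ p :: nid :: l2) := by
  induction l1 generalizing c with
  | nil =>
    simp only [List.nil_append] at h hnd hfresh ⊢
    obtain ⟨rfl, n, hn, hc⟩ := h
    have hne : nid ≠ c := fun he => hfresh (by simp [he])
    refine ⟨rfl, nid, by rw [PySem.Dict.get?_insert_self], ?_⟩
    refine ⟨rfl, n, ?_, ?_⟩
    · rw [PySem.Dict.get?_insert_of_ne _ _ hne, PySem.Dict.get?_insert_self]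
      congr 1
      rw [PySem.Dict.getD_eq_get?_getD, hn]
      rfl
    · have hc' : Chain (nxt.insert nid (nxt.getD c (-1))) n l2 :=
        chain_insert_of_notmem _ _ _ _ _ (fun ht => hfresh (by simp [ht])) hc
      exact chain_insert_of_notmem _ _ _ _ _ (fun ht => (List.nodup_cons.mp hnd).1 ht) hc'
  | cons a t ih =>
    simp only [List.cons_append] at h hnd hfresh ⊢
    obtain ⟨rfl, n, hn, hc⟩ := h
    obtain ⟨hna, hnd'⟩ := List.nodup_cons.mp hnd
    refine ⟨rfl, n, ?_, ih n hc hnd' (fun ht => hfresh (by simp [ht]))⟩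
    have h1 : c ≠ p := fun he => hna (by simp [he])
    have h2 : c ≠ nid := fun he => hfresh (by simp [he.symm])
    rw [PySem.Dict.get?_insert_of_ne _ _ h1, PySem.Dict.get?_insert_of_ne _ _ h2]
    exact hn

theorem walk_of_chain (names : List String) (nxt : PySem.Dict Int Int) (ids : List Int)
    (hend : -1 ∉ ids) :
    ∀ (fuel : Nat) (c : Int), Chain nxt c ids → ids.length ≤ fuel →
    altWalk names nxt fuel c = ids.map (NameAt names) := by
  induction ids with
  | nil =>
    intro fuel c hc _
    cases fuel with
    | zero => rfl
    | succ f => simp [altWalk, show c = -1 from hc]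
  | cons a t ih =>
    intro fuel c hc hlen
    obtain ⟨rfl, n, hn, hrest⟩ := hc
    cases fuel with
    | zero => simp at hlen
    | succ f =>
      have hne : c ≠ -1 := fun he => hend (by simp [he])
      simp only [altWalk, if_neg hne, List.map_cons]
      refine congrArg _ ?_
      have : nxt.getD c (-1) = n := by rw [PySem.Dict.getD_eq_get?_getD, hn]; rfl
      rw [this]
      exact ih (fun ht => hend (by simp [ht])) f n hrest (by simpa using Nat.le_of_succ_le_succ hlen)

theorem nameAt_range_map (names : List String) :
    ((List.range names.length).map (fun k : Nat => (k : Int))).map (NameAt names) = names := by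
  apply List.ext_getElem (by simp)
  intro i h1 h2
  simp only [List.getElem_map, List.getElem_range, NameAt, PySem.List.pyGetD_natCast]
  exact List.getD_eq_getElem _ _ (by simpa using h2)

theorem chain_init (len : Nat) (g : Int → Int)
    (hg : ∀ k : Nat, k < len → g (k : Int) = if (k : Int) + 1 < (len : Int) then (k : Int) + 1 else -1) :
    ∀ (n j : Nat), j + n = len →
    Chain ((PySem.List.pyRange 0 (len : Int)).foldl (fun d x => d.insert x (g x)) PySem.Dict.empty)
      (if j < len then (j : Int) else -1) ((List.range' j n).map (fun k : Nat => (k : Int))) := by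
  intro n
  induction n with
  | zero =>
    intro j hj
    have : ¬ j < len := by omega
    simp only [this, if_false, List.range'_zero, List.map_nil]
    rfl
  | succ m ih =>
    intro j hj
    have hjl : j < len := by omega
    rw [List.range'_succ]
    refine ⟨by simp [hjl], g (j : Int), ?_, ?_⟩
    · rw [get?_foldl_insert_fn]
      beta_reduce
      rw [if_pos (by rw [PySem.List.mem_pyRange_one]; omega)]
    · rw [hg j hjl]
      have hih := ih (j + 1) (by omega)
      by_cases h1 : j + 1 < len
      · have : ((j : Int) + 1 < (len : Int)) := by exact_mod_cast h1
        rw [if_pos this]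
        simpa [h1, Nat.cast_add] using hih
      · have : ¬ ((j : Int) + 1 < (len : Int)) := by omega
        rw [if_neg this]
        simpa [h1] using hih

theorem find?_range'_nameAt (nm : String) :
    ∀ (n a : Nat) (full : List String), a + n = full.length →
    ((List.range' a n).map (fun k : Nat => (k : Int))).find? (fun c => NameAt full c == nm)
      = (PySem.List.index? (full.drop a) nm).map (fun k : Nat => ((a + k : Nat) : Int)) := by
  intro n
  induction n with
  | zero =>
    intro a full ha
    have : full.drop a = [] := List.drop_eq_nil_of_le (by omega)
    simp [this, PySem.List.index?_eq_idxOf?]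
  | succ m ih =>
    intro a full ha
    have halt : a < full.length := by omega
    rw [List.range'_succ, List.map_cons, List.find?_cons, List.drop_eq_getElem_cons halt]
    have hna : NameAt full (a : Int) = full[a] := by
      simp only [NameAt, PySem.List.pyGetD_natCast]
      exact List.getD_eq_getElem _ _ halt
    by_cases he : full[a] = nm
    · rw [show ((NameAt full (a : Int) == nm) : Bool) = true by simp [hna, he]]
      rw [he, PySem.List.index?_cons_self]
      simp
    · rw [show ((NameAt full (a : Int) == nm) : Bool) = false by simp [hna, he]]
      rw [PySem.List.index?_cons_of_ne _ he, ih (a + 1) full (by omega)]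
      cases PySem.List.index? (full.drop (a + 1)) nm with
      | none => simp
      | some k =>
        simp only [Option.map_some, Option.some.injEq]
        push_cast
        ring

theorem inv_init (old : List String) : SimInv (altInit old) old := by
  refine ⟨(List.range old.length).map (fun k : Nat => (k : Int)), ?_, ?_, ?_, ?_, ?_, ?_⟩
  · have hch := chain_init old.length
      (fun k => if k + 1 < (old.length : Int) then k + 1 else -1)
      (fun k _ => rfl) old.length 0 (by omega)
    rw [List.range_eq_range']
    have hhead : (altInit old).head = (if 0 < old.length then ((0 : Nat) : Int) else -1) := by
      unfold altInit
      rcases old with _ | ⟨x, t⟩ <;> simp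
    rw [hhead]
    exact hch
  · exact (nameAt_range_map old).symm
  · intro c hc
    simp only [List.mem_map, List.mem_range] at hc
    obtain ⟨k, hk, rfl⟩ := hc
    constructor
    · positivity
    · exact_mod_cast hk
  · exact List.Nodup.map (fun a b => by omega) List.nodup_range
  · simp [altInit]
  · intro nm
    show ((PySem.List.enumerate old).foldl
      (fun d p => if d.contains p.2 then d else d.insert p.2 p.1) PySem.Dict.empty).get? nm = _
    rw [firstAux, enumerate_find? old 0 nm]
    have hr := find?_range'_nameAt nm old.length 0 old (by omega)
    have hn : (altInit old).names = old := rfl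
    rw [List.range_eq_range', hn, hr, List.drop_zero]
    cases PySem.List.index? old nm with
    | none => simp
    | some k => simp

theorem nameAt_append_lt (names : List String) (name : String) (c : Int)
    (h0 : 0 ≤ c) (h : c < (names.length : Int)) :
    NameAt (names ++ [name]) c = NameAt names c := by
  have hk : ((c.toNat : Nat) : Int) = c := by omega
  rw [← hk]
  simp only [NameAt, PySem.List.pyGetD_natCast]
  have hlt : c.toNat < names.length := by omega
  rw [List.getD_eq_getElem _ _ (by simp; omega), List.getD_eq_getElem _ _ hlt]
  exact List.getElem_append_left _

theorem nameAt_append_self (names : List String) (name : String) :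
    NameAt (names ++ [name]) ((names.length : Nat) : Int) = name := by
  simp only [NameAt, PySem.List.pyGetD_natCast]
  rw [List.getD_eq_getElem _ _ (by simp)]
  simp

theorem pyGetD_mem (xs : List String) (i : Int)
    (h1 : -(xs.length : Int) ≤ i) (h2 : i < (xs.length : Int)) :
    PySem.List.pyGetD xs i "" ∈ xs := by
  by_cases h0 : 0 ≤ i
  · rw [PySem.List.pyGetD_eq_getElem _ _ h0 h2]
    exact List.getElem_mem _
  · have hk0 : 0 < (-i).toNat := by omega
    have hkl : (-i).toNat ≤ xs.length := by omega
    have : i = -(((-i).toNat : Nat) : Int) := by omega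
    rw [this, PySem.List.pyGetD_neg_natCast _ _ _ hk0 hkl]
    exact List.getElem_mem _

theorem contains_iff_mem (st : BState) (s : List String) (ids : List Int)
    (hs : s = ids.map (NameAt st.names))
    (hnode : ∀ nm : String, st.node.get? nm = ids.find? (fun c => NameAt st.names c == nm))
    (nm : String) : st.node.contains nm = true ↔ nm ∈ s := by
  rw [PySem.Dict.contains_eq_isSome_get?, hnode, Option.isSome_iff_exists]
  constructor
  · rintro ⟨c, hc⟩
    have hmem := List.mem_of_find?_eq_some hc
    have heq : NameAt st.names c = nm := by simpa using List.find?_some hc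
    rw [hs]
    exact heq ▸ List.mem_map_of_mem hmem
  · intro hm
    rw [hs] at hm
    obtain ⟨c, hc, rfl⟩ := List.mem_map.mp hm
    have : (ids.find? (fun c' => NameAt st.names c' == NameAt st.names c)).isSome := by
      rw [List.find?_isSome]
      exact ⟨c, hc, by simp⟩
    rwa [Option.isSome_iff_exists] at this

theorem inv_prepend (st : BState) (s : List String) (name : String)
    (hinv : SimInv st s) (hname : name ∉ s) :
    SimInv ⟨st.names ++ [name], st.nxt.insert ((st.names.length : Nat) : Int) st.head,
            st.node.insert name ((st.names.length : Nat) : Int), ((st.names.length : Nat) : Int)⟩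
      (name :: s) := by
  obtain ⟨ids, hch, hs, hbd, hnd, hlen, hnode⟩ := hinv
  have hfresh : ((st.names.length : Nat) : Int) ∉ ids := fun hm => by
    have := hbd _ hm; omega
  refine ⟨((st.names.length : Nat) : Int) :: ids, ?_, ?_, ?_, ?_, ?_, ?_⟩
  · exact ⟨rfl, st.head, PySem.Dict.get?_insert_self _ _ _, chain_insert_of_notmem _ _ _ _ _ hfresh hch⟩
  · simp only [List.map_cons, nameAt_append_self]
    rw [hs]
    exact congrArg _ (List.map_congr_left (fun c hc =>
      (nameAt_append_lt st.names name c (hbd c hc).1 (hbd c hc).2).symm))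
  · intro c hc
    rcases List.mem_cons.mp hc with rfl | hc'
    · simp only [List.length_append, List.length_cons, List.length_nil]
      refine ⟨by positivity, by push_cast; omega⟩
    · have := hbd c hc'
      simp only [List.length_append, List.length_cons, List.length_nil]
      constructor
      · exact this.1
      · push_cast; omega
  · exact List.nodup_cons.mpr ⟨hfresh, hnd⟩
  · simp only [List.length_cons, List.length_append, List.length_cons, List.length_nil]
    omega
  · intro nm
    by_cases he : nm = name
    · rw [he]
      rw [PySem.Dict.get?_insert_self]
      simp only [List.find?_cons, nameAt_append_self, BEq.rfl]
    · rw [PySem.Dict.get?_insert_of_ne _ _ he]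
      have hf : ((NameAt (st.names ++ [name]) ((st.names.length : Nat) : Int) == nm) : Bool) = false := by
        rw [nameAt_append_self]
        simpa using fun h => he h.symm
      simp only [List.find?_cons, hf]
      rw [hnode nm]
      exact find?_congr_mem _ _ _ (fun c hc => by
        rw [nameAt_append_lt st.names name c (hbd c hc).1 (hbd c hc).2])

theorem inv_insertAfter (st : BState) (s : List String) (name pre : String)
    (hinv : SimInv st s) (hname : name ∉ s) (hpre : pre ∈ s) :
    ∃ sp : Nat, PySem.List.index? s pre = some sp ∧
      SimInv ⟨st.names ++ [name],
              (st.nxt.insert ((st.names.length : Nat) : Int)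
                  (st.nxt.getD (st.node.getD pre 0) (-1))).insert
                (st.node.getD pre 0) ((st.names.length : Nat) : Int),
              st.node.insert name ((st.names.length : Nat) : Int),
              st.head⟩
        (s.take (sp + 1) ++ name :: s.drop (sp + 1)) := by
  obtain ⟨ids, hch, hs, hbd, hnd, hlen, hnode⟩ := hinv
  have hpsome : ∃ p, st.node.get? pre = some p := by
    have hc : st.node.contains pre = true := (contains_iff_mem st s ids hs hnode pre).mpr hpre
    rw [PySem.Dict.contains_eq_isSome_get?] at hc
    exact Option.isSome_iff_exists.mp hc
  obtain ⟨p, hp⟩ := hpsome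
  have hpd : st.node.getD pre 0 = p := by rw [PySem.Dict.getD_eq_get?_getD, hp]; rfl
  have hfind : ids.find? (fun c => NameAt st.names c == pre) = some p := by rw [← hnode, hp]
  obtain ⟨hpeq, as, bs, hids, hfail⟩ := List.find?_eq_some_iff_append.mp hfind
  have hfp : NameAt st.names p = pre := by simpa using hpeq
  have hpids : p ∈ ids := by rw [hids]; simp
  have hfresh : ((st.names.length : Nat) : Int) ∉ ids := fun hm => by
    have := hbd _ hm; omega
  have hsplit : s = (as.map (NameAt st.names) ++ [pre]) ++ bs.map (NameAt st.names) := by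
    rw [hs, hids]
    simp [hfp]
  have hidx : PySem.List.index? s pre = some as.length := by
    rw [PySem.List.index?_eq_some_iff]
    refine ⟨as.map (NameAt st.names), bs.map (NameAt st.names), ?_, by simp, ?_⟩
    · rw [hsplit]; simp
    · intro hm
      obtain ⟨a, ha, haeq⟩ := List.mem_map.mp hm
      have hfa := hfail a ha
      simp at hfa
      exact hfa haeq
  have htake : s.take (as.length + 1) = as.map (NameAt st.names) ++ [pre] := by
    rw [hsplit]
    exact List.take_left' (by simp)
  have hdrop : s.drop (as.length + 1) = bs.map (NameAt st.names) := by
    rw [hsplit]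
    exact List.drop_left' (by simp)
  refine ⟨as.length, hidx, ?_⟩
  have hperm : (as ++ p :: ((st.names.length : Nat) : Int) :: bs).Perm
      (((st.names.length : Nat) : Int) :: ids) := by
    have h1 : as ++ p :: ((st.names.length : Nat) : Int) :: bs
        = (as ++ [p]) ++ ((st.names.length : Nat) : Int) :: bs := by simp
    rw [h1, hids]
    refine List.perm_middle.trans ?_
    simp
  refine ⟨as ++ p :: ((st.names.length : Nat) : Int) :: bs, ?_, ?_, ?_, ?_, ?_, ?_⟩
  · rw [hpd]
    exact chain_splice st.nxt st.head p _ as bs (hids ▸ hch) (hids ▸ hnd) (hids ▸ hfresh)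
  · rw [htake, hdrop]
    simp only [List.map_append, List.map_cons, nameAt_append_self]
    have hmas : as.map (NameAt (st.names ++ [name])) = as.map (NameAt st.names) :=
      List.map_congr_left (fun c hc => nameAt_append_lt st.names name c
        (hbd c (by rw [hids]; simp [hc])).1 (hbd c (by rw [hids]; simp [hc])).2)
    have hmbs : bs.map (NameAt (st.names ++ [name])) = bs.map (NameAt st.names) :=
      List.map_congr_left (fun c hc => nameAt_append_lt st.names name c
        (hbd c (by rw [hids]; simp [hc])).1 (hbd c (by rw [hids]; simp [hc])).2)
    have hmp : NameAt (st.names ++ [name]) p = pre := by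
      rw [nameAt_append_lt st.names name p (hbd p hpids).1 (hbd p hpids).2, hfp]
    rw [hmas, hmbs, hmp]
    simp
  · intro c hc
    have hc' : c = ((st.names.length : Nat) : Int) ∨ c ∈ ids := by
      have := hperm.mem_iff.mp hc
      rcases List.mem_cons.mp this with h | h
      · exact Or.inl h
      · exact Or.inr h
    simp only [List.length_append, List.length_cons, List.length_nil]
    rcases hc' with rfl | h
    · refine ⟨by positivity, by push_cast; omega⟩
    · have := hbd c h
      refine ⟨this.1, by push_cast; omega⟩
  · exact (hperm.nodup_iff).mpr (List.nodup_cons.mpr ⟨hfresh, hnd⟩)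
  · have := hperm.length_eq
    simp only [List.length_cons] at this
    simp only [this, List.length_append, List.length_cons, List.length_nil]
    omega
  · intro nm
    have hnid_name : NameAt (st.names ++ [name]) ((st.names.length : Nat) : Int) = name :=
      nameAt_append_self st.names name
    by_cases he : nm = name
    · rw [he]
      rw [PySem.Dict.get?_insert_self]
      rw [List.find?_append]
      have has : as.find? (fun c => NameAt (st.names ++ [name]) c == name) = none := by
        rw [List.find?_eq_none]
        intro c hc hbeq
        have hcm : c ∈ ids := by rw [hids]; simp [hc]
        have : NameAt st.names c = name := by
          rw [← nameAt_append_lt st.names name c (hbd c hcm).1 (hbd c hcm).2]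
          simpa using hbeq
        exact hname (by rw [hs]; exact this ▸ List.mem_map_of_mem hcm)
      rw [has]
      have hppre : ((NameAt (st.names ++ [name]) p == name) : Bool) = false := by
        rw [nameAt_append_lt st.names name p (hbd p hpids).1 (hbd p hpids).2, hfp]
        exact beq_eq_false_iff_ne.mpr (fun h => hname (h ▸ hpre))
      simp only [List.find?_cons, hppre, hnid_name, BEq.rfl, Option.none_or]
    · rw [PySem.Dict.get?_insert_of_ne _ _ he, hnode nm, hids]
      rw [List.find?_append, List.find?_append]
      have has : as.find? (fun c => NameAt (st.names ++ [name]) c == nm)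
          = as.find? (fun c => NameAt st.names c == nm) :=
        find?_congr_mem _ _ _ (fun c hc => by
          rw [nameAt_append_lt st.names name c
            (hbd c (by rw [hids]; simp [hc])).1 (hbd c (by rw [hids]; simp [hc])).2])
      rw [has]
      have hpp : NameAt (st.names ++ [name]) p = NameAt st.names p :=
        nameAt_append_lt st.names name p (hbd p hpids).1 (hbd p hpids).2
      have hnidf : ((NameAt (st.names ++ [name]) ((st.names.length : Nat) : Int) == nm) : Bool) = false := by
        rw [hnid_name]
        simpa using fun h => he h.symm
      have hbs : bs.find? (fun c => NameAt (st.names ++ [name]) c == nm)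
          = bs.find? (fun c => NameAt st.names c == nm) :=
        find?_congr_mem _ _ _ (fun c hc => by
          rw [nameAt_append_lt st.names name c
            (hbd c (by rw [hids]; simp [hc])).1 (hbd c (by rw [hids]; simp [hc])).2])
      simp only [List.find?_cons, hpp, hnidf, hbs]

theorem step_sim (seq : List String) (st : BState) (s : List String) (i : Int)
    (hinv : SimInv st s) (hlo : -(seq.length : Int) ≤ i) (hhi : i < (seq.length : Int)) :
    SimInv (altStep seq (altFirst seq) st i) (stepA seq s i) := by
  have hmemname : PySem.List.pyGetD seq i "" ∈ seq := pyGetD_mem seq i hlo hhi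
  obtain ⟨j, hj⟩ : ∃ j, PySem.List.index? seq (PySem.List.pyGetD seq i "") = some j :=
    Option.isSome_iff_exists.mp ((PySem.List.index?_isSome_iff _ _).mpr hmemname)
  obtain ⟨ids0, hch0, hs0, hbd0, hnd0, hlen0, hnode0⟩ := hinv
  have hinv' : SimInv st s := ⟨ids0, hch0, hs0, hbd0, hnd0, hlen0, hnode0⟩
  have hcont : ∀ nm, st.node.contains nm = true ↔ nm ∈ s :=
    contains_iff_mem st s ids0 hs0 hnode0
  simp only [stepA, altStep, hj, altFirst_getD seq _ j hj]
  by_cases hmem : PySem.List.pyGetD seq i "" ∈ s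
  · rw [if_pos ((hcont _).mpr hmem),
      if_neg (show ¬ (PySem.List.pyGetD seq i "" ∉ s) from fun h => h hmem)]
    exact hinv'
  · have hcf : ¬ st.node.contains (PySem.List.pyGetD seq i "") = true := fun h =>
      hmem ((hcont _).mp h)
    rw [if_neg hcf, if_pos hmem]
    by_cases hpre : PySem.List.pyGetD seq ((j : Int) - 1) "" ∈ s
    · by_cases hjpos : 0 < j
      · rw [if_pos (show (0 : Int) < (j : Int) ∧
            st.node.contains (PySem.List.pyGetD seq ((j : Int) - 1) "") = true from
            ⟨by exact_mod_cast hjpos, (hcont _).mpr hpre⟩),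
          if_pos hjpos, if_pos hpre]
        obtain ⟨sp, hidx, hinv2⟩ := inv_insertAfter st s (PySem.List.pyGetD seq i "")
          (PySem.List.pyGetD seq ((j : Int) - 1) "") hinv' hmem hpre
        simp only [hidx]
        have hc1 : ((sp : Int) + 1) = (((sp + 1 : Nat)) : Int) := by push_cast; ring
        rw [hc1, PySem.List.slice_to_natCast, PySem.List.slice_from_natCast]
        have heq : s.take (sp + 1) ++ [PySem.List.pyGetD seq i ""] ++ s.drop (sp + 1)
            = s.take (sp + 1) ++ PySem.List.pyGetD seq i "" :: s.drop (sp + 1) := by simp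
        rw [heq]
        exact hinv2
      · rw [if_neg (show ¬ ((0 : Int) < (j : Int) ∧
            st.node.contains (PySem.List.pyGetD seq ((j : Int) - 1) "") = true) from
            fun hand => hjpos (by exact_mod_cast hand.1)),
          if_neg hjpos]
        exact inv_prepend st s _ hinv' hmem
    · have hnc : ¬ ((0 : Int) < (j : Int) ∧
          st.node.contains (PySem.List.pyGetD seq ((j : Int) - 1) "") = true) :=
        fun hand => hpre ((hcont _).mp hand.2)
      rw [if_neg hnc]
      by_cases hjpos : 0 < j
      · rw [if_pos hjpos, if_neg hpre]
        exact inv_prepend st s _ hinv' hmem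
      · rw [if_neg hjpos]
        exact inv_prepend st s _ hinv' hmem

theorem fold_sim (seq : List String) (l : List Int) (st : BState) (s : List String)
    (hinv : SimInv st s) (hl : ∀ i ∈ l, -(seq.length : Int) ≤ i ∧ i < (seq.length : Int)) :
    SimInv (l.foldl (altStep seq (altFirst seq)) st) (l.foldl (stepA seq) s) := by
  induction l generalizing st s with
  | nil => exact hinv
  | cons a t ih =>
    exact ih _ _ (step_sim seq st s a hinv (hl a (by simp)).1 (hl a (by simp)).2)
      (fun i hi => hl i (by simp [hi]))

-- ===== VERDICT (by name: the statement is the Claim_ definition above) =====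
theorem create_name_seq_one_spec : Claim_equal_create_name_seq_one := by
  intro old cp seq _hdom hpre
  unfold Spec_create_name_seq_one
  rw [A_eq_fold (((seq.length : Int) - cp).toNat) old cp seq rfl]
  unfold create_name_seq_one_alt
  by_cases hend : (seq.length : Int) ≤ cp
  · rw [if_pos hend, PySem.List.pyRange_one, show ((seq.length : Int) - cp).toNat = 0 by omega]
    rfl
  · rw [if_neg hend]
    have hfold := fold_sim seq (PySem.List.pyRange cp (seq.length : Int)) (altInit old) old
      (inv_init old)
      (fun i hi => by
        rw [PySem.List.mem_pyRange_one] at hi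
        exact ⟨by unfold Pre_create_name_seq_one at hpre; omega, hi.2⟩)
    obtain ⟨ids, hch, hs, hbd, _hnd, hlen, _hnode⟩ := hfold
    rw [hs]
    exact (walk_of_chain _ _ ids
      (fun hm => by have := hbd _ hm; omega) _ _ hch hlen).symm
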